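-- pv_equiv track=rewrite | github.com/lane-neuro/research-analytics-suite | research_analytics_suite/hardware_manager/interface/serial/SerialDetector.py | _parse_serial_output_windows
-- ===== SOURCE A (Python) =====
-- def _parse_serial_output_windows(output):
--     """Parse the output of the mode command to find serial ports."""
--     serial_ports = []
--     current_port = []
--     for line in output.split('\n'):
--         if 'Status for device' in line:
--             if current_port:
--                 serial_ports.append('\n'.join(current_port).strip())
--                 current_port = []
--         current_port.append(line.strip())
--     if current_port:
--         serial_ports.append('\n'.join(current_port).strip())
--     return [port for port in serial_ports if port]
-- ===== SOURCE B (Python) =====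
-- def _parse_serial_output_windows(output):
--     """Parse the output of the mode command to find serial ports."""
--     lines = output.split('\n')
--     ports = []
--     while lines:
--         # a block is the first line plus every following line without the marker
--         k = 1
--         while k < len(lines) and 'Status for device' not in lines[k]:
--             k += 1
--         block = '\n'.join(line.strip() for line in lines[:k]).strip()
--         if block:
--             ports.append(block)
--         lines = lines[k:]
--     return ports
-- ===== Notes on version B (the rewrite author's own statement) =====
-- stated objective: alternative
-- what changed: Replaces A's single-pass accumulator-and-flush fold (flush current block whenever a 'Status for device' line arrives, plus a final flush) by an outer loop that repeatedly scans ahead to the next marker line and slices one whole block off the front, filtering empty blocks inline instead of at the end.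
import Mathlib
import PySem

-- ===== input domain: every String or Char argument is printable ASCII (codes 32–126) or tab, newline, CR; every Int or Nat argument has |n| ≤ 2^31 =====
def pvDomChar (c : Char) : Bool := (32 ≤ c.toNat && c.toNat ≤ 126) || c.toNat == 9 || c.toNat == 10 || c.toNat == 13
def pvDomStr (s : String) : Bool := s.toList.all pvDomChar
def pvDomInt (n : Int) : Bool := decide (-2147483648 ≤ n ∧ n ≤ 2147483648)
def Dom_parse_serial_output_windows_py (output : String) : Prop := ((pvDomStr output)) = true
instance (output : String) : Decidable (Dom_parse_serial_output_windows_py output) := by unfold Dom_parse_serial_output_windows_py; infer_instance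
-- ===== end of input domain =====

-- B replaces A's accumulator/flush fold by an outer loop that scans ahead to the next marker and slices one block off the front (alternative decomposition, same cost).

-- ===== PORT A =====
-- loop body of A's for-loop: flush the current block on a marker line, then append the stripped line
def pvStepA (st : List String × List String) (line : String) : List String × List String :=
  let st :=
    if PySem.Str.isIn "Status for device" line && !st.2.isEmpty then
      (st.1 ++ [PySem.Str.strip (PySem.Str.join "\n" st.2)], ([] : List String))
    else st
  (st.1, st.2 ++ [PySem.Str.strip line])

def parse_serial_output_windows_py (output : String) : List String :=
  let st := ((PySem.Str.split? output "\n").getD []).foldl pvStepA ([], [])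
  let serial_ports :=
    if !st.2.isEmpty then st.1 ++ [PySem.Str.strip (PySem.Str.join "\n" st.2)] else st.1
  serial_ports.filter (fun port => !(port == ""))

-- ===== PORT B =====
-- Source B's outer while-loop: the inner while computing k is the takeWhile/dropWhile split of the tail at the first marker line
def pvGoB : List String → List String
  | [] => []
  | l :: rest =>
    let seg := rest.takeWhile (fun s => !PySem.Str.isIn "Status for device" s)
    let block := PySem.Str.strip (PySem.Str.join "\n" ((l :: seg).map PySem.Str.strip))
    let tail := pvGoB (rest.dropWhile (fun s => !PySem.Str.isIn "Status for device" s))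
    if !(block == "") then block :: tail else tail
  termination_by ls => ls.length
  decreasing_by
    simpa using Nat.lt_succ_of_le (List.length_dropWhile_le _ _)

def parse_serial_output_windows_py_alt (output : String) : List String :=
  pvGoB ((PySem.Str.split? output "\n").getD [])

-- ===== PRECONDITION & SPEC =====
def Spec_parse_serial_output_windows_py (output : String) (out : List String) : Prop := out = parse_serial_output_windows_py_alt output
instance (output : String) (out : List String) : Decidable (Spec_parse_serial_output_windows_py output out) := by unfold Spec_parse_serial_output_windows_py; infer_instance

-- ===== CLAIM (what is proved, stated in full; the proofs are below) =====
def Claim_equal_parse_serial_output_windows_py : Prop := ∀ (output : String), Dom_parse_serial_output_windows_py output → Spec_parse_serial_output_windows_py output (parse_serial_output_windows_py output)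

-- ===== LEMMAS AND PROOFS =====

-- unfiltered block list, shared characterisation of both loops
def pvRaw : List String → List String
  | [] => []
  | l :: rest =>
    PySem.Str.strip (PySem.Str.join "\n" ((l :: rest.takeWhile (fun s => !PySem.Str.isIn "Status for device" s)).map PySem.Str.strip))
      :: pvRaw (rest.dropWhile (fun s => !PySem.Str.isIn "Status for device" s))
  termination_by ls => ls.length
  decreasing_by
    simpa using Nat.lt_succ_of_le (List.length_dropWhile_le _ _)

-- B's loop filters pvRaw inline
theorem pvGoB_eq_filter : ∀ ls : List String, pvGoB ls = (pvRaw ls).filter (fun p => !(p == "")) := by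
  intro ls
  induction ls using pvRaw.induct with
  | case1 => simp [pvGoB, pvRaw]
  | case2 l rest ih =>
    rw [pvGoB, pvRaw, List.filter_cons, ih]

-- A's finalize step (the final flush)
def pvFin (st : List String × List String) : List String :=
  if !st.2.isEmpty then st.1 ++ [PySem.Str.strip (PySem.Str.join "\n" st.2)] else st.1

-- A's fold, flushed at the end, produces acc ++ the raw blocks of the remaining lines
theorem pvA_loop : ∀ (rest acc cur : List String), cur ≠ [] →
    pvFin (rest.foldl pvStepA (acc, cur))
      = acc ++ (PySem.Str.strip (PySem.Str.join "\n"
          (cur ++ (rest.takeWhile (fun s => !PySem.Str.isIn "Status for device" s)).map PySem.Str.strip))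
          :: pvRaw (rest.dropWhile (fun s => !PySem.Str.isIn "Status for device" s))) := by
  intro rest
  induction rest with
  | nil =>
    intro acc cur hcur
    simp [pvFin, pvRaw, hcur]
  | cons r rs ih =>
    intro acc cur hcur
    by_cases hr : PySem.Str.isIn "Status for device" r = true
    · have hstep : pvStepA (acc, cur) r
          = (acc ++ [PySem.Str.strip (PySem.Str.join "\n" cur)], [PySem.Str.strip r]) := by
        simp [-PySem.Str.isIn_eq, pvStepA, hr, hcur]
      rw [List.foldl_cons, hstep, ih _ _ (by simp)]
      conv_rhs => rw [pvRaw.eq_def]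
      simp [-PySem.Str.isIn_eq, hr]
    · rw [Bool.not_eq_true] at hr
      have hstep : pvStepA (acc, cur) r = (acc, cur ++ [PySem.Str.strip r]) := by
        simp [-PySem.Str.isIn_eq, pvStepA, hr]
      rw [List.foldl_cons, hstep, ih _ _ (by simp)]
      simp [-PySem.Str.isIn_eq, hr]

-- the two ports agree
theorem pv_main (output : String) :
    parse_serial_output_windows_py output = parse_serial_output_windows_py_alt output := by
  unfold parse_serial_output_windows_py parse_serial_output_windows_py_alt
  show List.filter _ (pvFin (List.foldl pvStepA ([], []) _)) = _
  rw [pvGoB_eq_filter]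
  cases h : (PySem.Str.split? output "\n").getD [] with
  | nil => simp [pvRaw, pvFin]
  | cons l rest =>
    have hfirst : pvStepA ([], []) l = ([], [PySem.Str.strip l]) := by
      simp [pvStepA]
    rw [List.foldl_cons, hfirst, pvA_loop rest [] [PySem.Str.strip l] (by simp)]
    conv_rhs => rw [pvRaw.eq_def]
    simp [-PySem.Str.isIn_eq]

-- ===== VERDICT (by name: the statement is the Claim_ definition above) =====
theorem parse_serial_output_windows_py_spec : Claim_equal_parse_serial_output_windows_py := by
  intro output _
  unfold Spec_parse_serial_output_windows_py
  exact pv_main output
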